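-- pv_equiv track=rewrite | github.com/jchxu/Format_Data | v2/OperateFunc.py | ClassifyByPort
-- ===== SOURCE A (Python) =====
-- def ClassifyByPort(Owner, Goods, Amount, Port, StdPort):
--     OwnerByPort = {}
--     GoodsByPort = {}
--     AmountByPort = {}
--     for item in StdPort:
--         OwnerByPort[item] = []
--         GoodsByPort[item] = []
--         AmountByPort[item] = []
--     for i in range(0,len(Owner)):
--         if Port[i] in StdPort:
--             OwnerByPort[Port[i]].append(Owner[i])
--             GoodsByPort[Port[i]].append(Goods[i])
--             AmountByPort[Port[i]].append(Amount[i])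
--     return (OwnerByPort,GoodsByPort,AmountByPort)
-- ===== SOURCE B (Python) =====
-- def ClassifyByPort(Owner, Goods, Amount, Port, StdPort):
--     OwnerByPort = {}
--     GoodsByPort = {}
--     AmountByPort = {}
--     for p in StdPort:
--         rows = [i for i in range(len(Owner)) if Port[i] == p]
--         OwnerByPort[p] = [Owner[i] for i in rows]
--         GoodsByPort[p] = [Goods[i] for i in rows]
--         AmountByPort[p] = [Amount[i] for i in rows]
--     return (OwnerByPort, GoodsByPort, AmountByPort)
-- ===== Notes on version B (the rewrite author's own statement) =====
-- stated objective: alternative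
-- what changed: A does one bucketing pass over the records, appending each record into dicts seeded over StdPort; B inverts the loop structure: it iterates over the ports, and for each port scans the record indices to collect that port's rows, then materializes the three lists for that port directly (no seeding pass, no append-as-you-go state).
import Mathlib
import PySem

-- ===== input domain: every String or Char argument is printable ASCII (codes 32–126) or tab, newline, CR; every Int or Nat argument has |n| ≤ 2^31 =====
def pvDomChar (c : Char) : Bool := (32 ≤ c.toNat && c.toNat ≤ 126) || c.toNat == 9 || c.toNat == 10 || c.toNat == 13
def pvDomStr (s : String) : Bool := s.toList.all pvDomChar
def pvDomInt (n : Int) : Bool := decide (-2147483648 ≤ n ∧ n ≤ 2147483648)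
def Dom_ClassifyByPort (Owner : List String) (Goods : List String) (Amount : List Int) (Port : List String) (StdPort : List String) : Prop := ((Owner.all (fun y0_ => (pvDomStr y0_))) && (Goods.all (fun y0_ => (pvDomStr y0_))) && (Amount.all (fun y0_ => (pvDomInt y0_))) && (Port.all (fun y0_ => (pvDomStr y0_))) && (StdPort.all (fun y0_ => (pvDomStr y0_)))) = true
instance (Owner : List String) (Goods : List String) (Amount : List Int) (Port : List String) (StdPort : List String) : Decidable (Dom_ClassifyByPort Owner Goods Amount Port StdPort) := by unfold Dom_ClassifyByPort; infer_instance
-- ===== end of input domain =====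

-- B inverts the loop structure: instead of one bucketing pass over the records, it loops over the
-- ports and, for each port, scans the record indices to build that port's three lists directly
-- (objective: alternative decomposition, same cost).

-- ===== PORT A =====
-- literal transliteration of A: seed three empty-list dicts over StdPort, then one pass over
-- range(len(Owner)) appending Owner[i]/Goods[i]/Amount[i] into all three dicts when Port[i] in StdPort
def ClassifyByPort (Owner : List String) (Goods : List String) (Amount : List Int) (Port : List String) (StdPort : List String) : (List (String × List String)) × (List (String × List String)) × (List (String × List Int)) :=
  let init : PySem.Dict String (List String) × PySem.Dict String (List String) × PySem.Dict String (List Int) :=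
    StdPort.foldl (fun s item => (s.1.insert item [], s.2.1.insert item [], s.2.2.insert item []))
      (PySem.Dict.mk [], PySem.Dict.mk [], PySem.Dict.mk [])
  let fin :=
    (PySem.List.pyRange 0 (Owner.length : Int) 1).foldl (fun s i =>
      if StdPort.contains (PySem.List.pyGetD Port i "") then
        (s.1.modify (PySem.List.pyGetD Port i "") [] (· ++ [PySem.List.pyGetD Owner i ""]),
         s.2.1.modify (PySem.List.pyGetD Port i "") [] (· ++ [PySem.List.pyGetD Goods i ""]),
         s.2.2.modify (PySem.List.pyGetD Port i "") [] (· ++ [PySem.List.pyGetD Amount i 0]))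
      else s) init
  (fin.1.items, fin.2.1.items, fin.2.2.items)

-- ===== PORT B =====
-- literal transliteration of B: loop over StdPort; for each port p collect the matching record
-- indices 'rows' by scanning range(len(Owner)), then insert the three materialized lists for p
def ClassifyByPort_alt (Owner : List String) (Goods : List String) (Amount : List Int) (Port : List String) (StdPort : List String) : (List (String × List String)) × (List (String × List String)) × (List (String × List Int)) :=
  let fin :=
    StdPort.foldl (fun s p =>
      let rows := (PySem.List.pyRange 0 (Owner.length : Int) 1).filter
        (fun i => PySem.List.pyGetD Port i "" == p)
      (s.1.insert p (rows.map (fun i => PySem.List.pyGetD Owner i "")),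
       s.2.1.insert p (rows.map (fun i => PySem.List.pyGetD Goods i "")),
       s.2.2.insert p (rows.map (fun i => PySem.List.pyGetD Amount i 0))))
      ((PySem.Dict.mk [] : PySem.Dict String (List String)),
       (PySem.Dict.mk [] : PySem.Dict String (List String)),
       (PySem.Dict.mk [] : PySem.Dict String (List Int)))
  (fin.1.items, fin.2.1.items, fin.2.2.items)

-- ===== PRECONDITION & SPEC =====
-- Pre_ excludes exactly the inputs where Python A raises IndexError: Port shorter than Owner,
-- or a matched index i beyond Goods/Amount.
def Pre_ClassifyByPort (Owner : List String) (Goods : List String) (Amount : List Int) (Port : List String) (StdPort : List String) : Prop :=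
  Owner.length ≤ Port.length ∧
  ∀ i, i < Owner.length → (StdPort.contains (Port.getD i "") = true → i < Goods.length ∧ i < Amount.length)
instance (Owner : List String) (Goods : List String) (Amount : List Int) (Port : List String) (StdPort : List String) : Decidable (Pre_ClassifyByPort Owner Goods Amount Port StdPort) := by unfold Pre_ClassifyByPort; infer_instance
def pvWitness_ClassifyByPort : List String × List String × List Int × List String × List String :=
  (["a"], ["g"], [1], ["p"], ["p", "q"])
def Spec_ClassifyByPort (Owner : List String) (Goods : List String) (Amount : List Int) (Port : List String) (StdPort : List String) (out : (List (String × List String)) × (List (String × List String)) × (List (String × List Int))) : Prop := out = ClassifyByPort_alt Owner Goods Amount Port StdPort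
instance (Owner : List String) (Goods : List String) (Amount : List Int) (Port : List String) (StdPort : List String) (out : (List (String × List String)) × (List (String × List String)) × (List (String × List Int))) : Decidable (Spec_ClassifyByPort Owner Goods Amount Port StdPort out) := by unfold Spec_ClassifyByPort; infer_instance

-- ===== CLAIM (what is proved, stated in full; the proofs are below) =====
def Claim_equal_ClassifyByPort : Prop := ∀ (Owner : List String) (Goods : List String) (Amount : List Int) (Port : List String) (StdPort : List String), Dom_ClassifyByPort Owner Goods Amount Port StdPort → Pre_ClassifyByPort Owner Goods Amount Port StdPort → Spec_ClassifyByPort Owner Goods Amount Port StdPort (ClassifyByPort Owner Goods Amount Port StdPort)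

-- ===== LEMMAS AND PROOFS =====

-- items of an insert-fold over l starting from a dict ⟨s.map (p, f p)⟩ with s Nodup and f a pure
-- function of the key: the result is (Set.update s l).map (p, f p)
theorem pv_items_foldl_insert {κ ν : Type} [BEq κ] [LawfulBEq κ] (f : κ → ν) :
    ∀ (l s : List κ), s.Nodup →
      (l.foldl (fun d p => d.insert p (f p)) (PySem.Dict.mk (s.map (fun p => (p, f p))))).items
        = (PySem.Set.update s l).map (fun p => (p, f p)) := by
  intro l
  induction l with
  | nil => intro s _; simp [PySem.Set.update]
  | cons p l ih =>
    intro s hs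
    rw [List.foldl_cons, PySem.Set.update_cons]
    by_cases hp : p ∈ s
    · have h1 : (PySem.Dict.mk (s.map (fun p => (p, f p)))).insert p (f p)
          = PySem.Dict.mk (s.map (fun p => (p, f p))) := by
        have hc : (PySem.Dict.mk (s.map (fun p => (p, f p)))).contains p = true := by
          simp only [PySem.Dict.contains, PySem.Dict.items, List.any_eq_true]
          exact ⟨(p, f p), List.mem_map_of_mem hp, by simp⟩
        simp only [PySem.Dict.insert, hc, if_pos]
        congr 1
        simp only [List.map_map]
        apply List.map_congr_left
        intro q _
        by_cases h : q = p
        · subst h; simp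
        · simp [h]
      have h2 : PySem.Set.add s p = s := by
        simp [PySem.Set.add, PySem.Set.contains, hp]
      rw [h1, h2, ih s hs]
    · have hc : (PySem.Dict.mk (s.map (fun p => (p, f p)))).contains p = false := by
        simp [PySem.Dict.contains, PySem.Dict.items, List.any_eq_true]
        intro q hq hqp
        exact absurd (by rw [← hqp]; exact hq) hp
      have h1 : (PySem.Dict.mk (s.map (fun p => (p, f p)))).insert p (f p)
          = PySem.Dict.mk ((s ++ [p]).map (fun p => (p, f p))) := by
        simp [PySem.Dict.insert, hc, PySem.Dict.items]
      have h2 : PySem.Set.add s p = s ++ [p] := by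
        simp only [PySem.Set.add]
        rw [if_neg]
        simp [PySem.Set.contains, hp]
      rw [h1, h2, ih (s ++ [p]) (by
        simp only [List.nodup_append, List.nodup_cons]
        simp [hs]
        exact fun a ha he => hp (he ▸ ha))]

-- keys of a dict, as items.map fst
theorem pv_keys_def {κ ν : Type} [BEq κ] (d : PySem.Dict κ ν) : d.keys = d.items.map (·.1) := rfl

-- contains is determined by keys
theorem pv_contains_eq_keys {κ ν : Type} [BEq κ] (d : PySem.Dict κ ν) (k : κ) :
    d.contains k = d.keys.any (· == k) := by
  simp only [PySem.Dict.contains, pv_keys_def, List.any_map]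
  rfl

-- getD through a conditional modify-append fold (A's grouping loop), for any query key
theorem pv_getD_condfold {κ ν ι : Type} [BEq κ] [LawfulBEq κ]
    (key : ι → κ) (cond : κ → Bool) (val : ι → ν) :
    ∀ (l : List ι) (d : PySem.Dict κ (List ν)) (q : κ),
      (l.foldl (fun d i => if cond (key i) then d.modify (key i) [] (· ++ [val i]) else d) d).getD q []
        = d.getD q [] ++ (l.filter (fun i => cond (key i) && (key i == q))).map val := by
  intro l
  induction l with
  | nil => intro d q; simp
  | cons i l ih =>
    intro d q
    rw [List.foldl_cons, List.filter_cons]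
    by_cases hc : cond (key i) = true
    · rw [if_pos hc, ih]
      by_cases hq : key i = q
      · subst hq
        rw [PySem.Dict.getD_modify_self]
        simp [hc, List.append_assoc]
      · rw [PySem.Dict.getD_modify_of_ne _ _ _ (Ne.symm hq)]
        simp [hc, hq]
    · rw [if_neg hc, ih]
      simp [Bool.eq_false_iff.mpr hc]

-- keys are preserved by the conditional modify-append fold when cond implies membership
theorem pv_keys_condfold {κ ν ι : Type} [BEq κ] [LawfulBEq κ]
    (key : ι → κ) (cond : κ → Bool) (val : ι → ν) :
    ∀ (l : List ι) (d : PySem.Dict κ (List ν)),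
      (∀ k, cond k = true → d.contains k = true) →
      (l.foldl (fun d i => if cond (key i) then d.modify (key i) [] (· ++ [val i]) else d) d).keys
        = d.keys := by
  intro l
  induction l with
  | nil => intro d _; rfl
  | cons i l ih =>
    intro d hd
    rw [List.foldl_cons]
    by_cases hc : cond (key i) = true
    · rw [if_pos hc]
      have hk : (d.modify (key i) [] (· ++ [val i])).keys = d.keys := by
        simp only [PySem.Dict.modify]
        exact PySem.Dict.keys_insert_of_contains _ _ (hd _ hc)
      rw [ih _ (by intro k hck; rw [pv_contains_eq_keys, hk, ← pv_contains_eq_keys]; exact hd k hck), hk]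
    · rw [if_neg hc]; exact ih d hd

-- items of a dict with Nodup keys, recovered from keys and getD
theorem pv_items_eq_keys_map {κ ν : Type} [BEq κ] [LawfulBEq κ] (dflt : ν) :
    ∀ (l : List (κ × ν)), (l.map (·.1)).Nodup →
      l = (l.map (·.1)).map (fun k => (k, (PySem.Dict.mk l).getD k dflt)) := by
  intro l
  induction l with
  | nil => intro _; rfl
  | cons p l ih =>
    intro h
    rw [List.map_cons, List.nodup_cons] at h
    obtain ⟨h1, h2⟩ := h
    have hp : (PySem.Dict.mk (p :: l)).getD p.1 dflt = p.2 := by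
      simp [PySem.Dict.getD, PySem.Dict.get?, List.find?_cons]
    simp only [List.map_cons, hp]
    refine List.cons_eq_cons.mpr ⟨rfl, ?_⟩
    conv_lhs => rw [ih h2]
    apply List.map_congr_left
    intro q hq
    have hne : (p.1 == q) = false := by
      simp only [beq_eq_false_iff_ne, ne_eq]
      intro he; exact h1 (he ▸ hq)
    simp [PySem.Dict.getD, PySem.Dict.get?, List.find?_cons, hne]

-- a triple fold splits into three component folds
theorem pv_foldl_triple {α β γ ι : Type}
    (g1 : ι → α → α) (g2 : ι → β → β) (g3 : ι → γ → γ) :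
    ∀ (l : List ι) (s : α × β × γ),
      l.foldl (fun s i => (g1 i s.1, g2 i s.2.1, g3 i s.2.2)) s
        = (l.foldl (fun a i => g1 i a) s.1, l.foldl (fun b i => g2 i b) s.2.1,
           l.foldl (fun c i => g3 i c) s.2.2) := by
  intro l
  induction l with
  | nil => intro s; rfl
  | cons i l ih => intro s; rw [List.foldl_cons, List.foldl_cons, List.foldl_cons, List.foldl_cons, ih]

-- items / keys / contains / getD of the dict-seeding folds, specialised to an empty start
theorem pv_foldl_insert_nil {κ ν : Type} [BEq κ] [LawfulBEq κ] (f : κ → ν) (l : List κ) :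
    (l.foldl (fun d p => d.insert p (f p)) (PySem.Dict.mk [])).items
      = (PySem.Set.ofList l).map (fun p => (p, f p)) := by
  simpa [PySem.Set.update_nil_left] using pv_items_foldl_insert f l [] List.nodup_nil

theorem pv_keys_foldl_insert_nil {κ ν : Type} [BEq κ] [LawfulBEq κ] (f : κ → ν) (l : List κ) :
    (l.foldl (fun d p => d.insert p (f p)) (PySem.Dict.mk [])).keys = PySem.Set.ofList l := by
  rw [pv_keys_def, pv_foldl_insert_nil]
  simp [Function.comp_def]

theorem pv_contains_foldl_insert_nil {κ ν : Type} [BEq κ] [LawfulBEq κ] (f : κ → ν) (l : List κ)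
    (k : κ) :
    (l.foldl (fun d p => d.insert p (f p)) (PySem.Dict.mk [])).contains k = l.contains k := by
  rw [pv_contains_eq_keys, pv_keys_foldl_insert_nil]
  rw [Bool.eq_iff_iff]
  simp [List.any_eq_true, PySem.Set.mem_ofList]

theorem pv_getD_mk_const_nil {κ ν : Type} [BEq κ] (s : List κ) (q : κ) :
    (PySem.Dict.mk (s.map (fun p => (p, ([] : List ν))))).getD q [] = [] := by
  induction s with
  | nil => rfl
  | cons p s ih =>
    simp only [List.map_cons]
    simp only [PySem.Dict.getD, PySem.Dict.get?, PySem.Dict.items, List.find?_cons] at ih ⊢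
    by_cases h : ((p, ([] : List ν)).1 == q) = true
    · simp [h]
    · simpa [h] using ih

theorem pv_getD_foldl_insert_nil_const {κ ν : Type} [BEq κ] [LawfulBEq κ] (l : List κ) (q : κ) :
    (l.foldl (fun d p => d.insert p ([] : List ν)) (PySem.Dict.mk [])).getD q [] = [] := by
  have hd : (l.foldl (fun d p => d.insert p ([] : List ν)) (PySem.Dict.mk []))
      = PySem.Dict.mk ((PySem.Set.ofList l).map (fun p => (p, ([] : List ν)))) :=
    PySem.Dict.ext (pv_foldl_insert_nil _ l)
  rw [hd]
  exact pv_getD_mk_const_nil (PySem.Set.ofList l) q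

-- A's whole pipeline for ONE of the three dicts: seed StdPort with [], then the guarded
-- modify-append loop; items come out as ofList StdPort paired with the filtered, mapped records
theorem pv_groupfold_items {ν : Type} (StdPort : List String) (key : Int → String)
    (val : Int → ν) (L : List Int) :
    (L.foldl (fun d i => if StdPort.contains (key i) then d.modify (key i) [] (· ++ [val i]) else d)
        (StdPort.foldl (fun d p => d.insert p ([] : List ν)) (PySem.Dict.mk []))).items
      = (PySem.Set.ofList StdPort).map
          (fun k => (k, (L.filter (fun i => StdPort.contains (key i) && (key i == k))).map val)) := by
  set d0 := StdPort.foldl (fun d p => d.insert p ([] : List ν)) (PySem.Dict.mk []) with hd0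
  set fin := L.foldl (fun d i => if StdPort.contains (key i) then d.modify (key i) [] (· ++ [val i]) else d) d0 with hfin
  have hkeys : fin.keys = PySem.Set.ofList StdPort := by
    rw [hfin, pv_keys_condfold key (fun k => StdPort.contains k) val L d0
      (fun k hk => by rw [hd0, pv_contains_foldl_insert_nil]; exact hk), hd0,
      pv_keys_foldl_insert_nil]
  have hget : ∀ q, fin.getD q [] = (L.filter (fun i => StdPort.contains (key i) && (key i == q))).map val := by
    intro q
    rw [hfin, pv_getD_condfold key (fun k => StdPort.contains k) val L d0 q, hd0,
      pv_getD_foldl_insert_nil_const, List.nil_append]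
  have hnd : (fin.items.map (·.1)).Nodup := by
    rw [← pv_keys_def, hkeys]; exact PySem.Set.nodup_ofList StdPort
  calc fin.items = (fin.items.map (·.1)).map (fun k => (k, (PySem.Dict.mk fin.items).getD k [])) :=
        pv_items_eq_keys_map [] fin.items hnd
    _ = (PySem.Set.ofList StdPort).map (fun k => (k, fin.getD k [])) := by rw [← pv_keys_def, hkeys]
    _ = _ := by
        apply List.map_congr_left
        intro q _
        rw [hget q]

-- for a key k that IS a member of StdPort, A's guarded filter collapses to B's plain filter
theorem pv_filter_member (StdPort : List String) (key : Int → String) (L : List Int)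
    (k : String) (hk : k ∈ StdPort) :
    L.filter (fun i => StdPort.contains (key i) && (key i == k))
      = L.filter (fun i => key i == k) := by
  apply List.filter_congr
  intro i _
  by_cases h : key i = k
  · subst h
    simp only [beq_self_eq_true, Bool.and_true]
    exact List.contains_iff_mem.mpr hk
  · simp [h]

-- the two ports agree everywhere
theorem pv_AB (Owner : List String) (Goods : List String) (Amount : List Int)
    (Port : List String) (StdPort : List String) :
    ClassifyByPort Owner Goods Amount Port StdPort = ClassifyByPort_alt Owner Goods Amount Port StdPort := by
  simp only [ClassifyByPort, ClassifyByPort_alt]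
  have hinit :
      (StdPort.foldl (fun s item => (s.1.insert item ([] : List String),
          s.2.1.insert item ([] : List String), s.2.2.insert item ([] : List Int)))
        (PySem.Dict.mk [], PySem.Dict.mk [], PySem.Dict.mk []))
      = (StdPort.foldl (fun d p => d.insert p ([] : List String)) (PySem.Dict.mk []),
         StdPort.foldl (fun d p => d.insert p ([] : List String)) (PySem.Dict.mk []),
         StdPort.foldl (fun d p => d.insert p ([] : List Int)) (PySem.Dict.mk [])) :=
    pv_foldl_triple (fun i a => a.insert i []) (fun i a => a.insert i []) (fun i a => a.insert i [])
      StdPort (PySem.Dict.mk [], PySem.Dict.mk [], PySem.Dict.mk [])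
  have hbodyA :
      (fun (s : PySem.Dict String (List String) × PySem.Dict String (List String) × PySem.Dict String (List Int)) (i : Int) =>
        if StdPort.contains (PySem.List.pyGetD Port i "") then
          (s.1.modify (PySem.List.pyGetD Port i "") [] (· ++ [PySem.List.pyGetD Owner i ""]),
           s.2.1.modify (PySem.List.pyGetD Port i "") [] (· ++ [PySem.List.pyGetD Goods i ""]),
           s.2.2.modify (PySem.List.pyGetD Port i "") [] (· ++ [PySem.List.pyGetD Amount i 0]))
        else s)
      = (fun s i =>
          ((fun (i : Int) a => if StdPort.contains (PySem.List.pyGetD Port i "") then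
              a.modify (PySem.List.pyGetD Port i "") [] (· ++ [PySem.List.pyGetD Owner i ""]) else a) i s.1,
           (fun (i : Int) a => if StdPort.contains (PySem.List.pyGetD Port i "") then
              a.modify (PySem.List.pyGetD Port i "") [] (· ++ [PySem.List.pyGetD Goods i ""]) else a) i s.2.1,
           (fun (i : Int) a => if StdPort.contains (PySem.List.pyGetD Port i "") then
              a.modify (PySem.List.pyGetD Port i "") [] (· ++ [PySem.List.pyGetD Amount i 0]) else a) i s.2.2)) := by
    funext s i
    by_cases h : StdPort.contains (PySem.List.pyGetD Port i "") = true
    · simp only [if_pos h]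
    · simp only [if_neg h]
  rw [hbodyA, hinit, pv_foldl_triple
    (fun (i : Int) (a : PySem.Dict String (List String)) =>
      if StdPort.contains (PySem.List.pyGetD Port i "") then
        a.modify (PySem.List.pyGetD Port i "") [] (· ++ [PySem.List.pyGetD Owner i ""]) else a)
    (fun (i : Int) (a : PySem.Dict String (List String)) =>
      if StdPort.contains (PySem.List.pyGetD Port i "") then
        a.modify (PySem.List.pyGetD Port i "") [] (· ++ [PySem.List.pyGetD Goods i ""]) else a)
    (fun (i : Int) (a : PySem.Dict String (List Int)) =>
      if StdPort.contains (PySem.List.pyGetD Port i "") then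
        a.modify (PySem.List.pyGetD Port i "") [] (· ++ [PySem.List.pyGetD Amount i 0]) else a)]
  rw [pv_foldl_triple
    (fun (p : String) (a : PySem.Dict String (List String)) =>
      a.insert p (((PySem.List.pyRange 0 (Owner.length : Int) 1).filter
        (fun i => PySem.List.pyGetD Port i "" == p)).map (fun i => PySem.List.pyGetD Owner i "")))
    (fun (p : String) (a : PySem.Dict String (List String)) =>
      a.insert p (((PySem.List.pyRange 0 (Owner.length : Int) 1).filter
        (fun i => PySem.List.pyGetD Port i "" == p)).map (fun i => PySem.List.pyGetD Goods i "")))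
    (fun (p : String) (a : PySem.Dict String (List Int)) =>
      a.insert p (((PySem.List.pyRange 0 (Owner.length : Int) 1).filter
        (fun i => PySem.List.pyGetD Port i "" == p)).map (fun i => PySem.List.pyGetD Amount i 0)))]
  simp only [Prod.mk.injEq]
  refine ⟨?_, ?_, ?_⟩ <;>
  · rw [pv_groupfold_items StdPort (fun i => PySem.List.pyGetD Port i ""), pv_foldl_insert_nil]
    apply List.map_congr_left
    intro q hq
    rw [pv_filter_member StdPort (fun i => PySem.List.pyGetD Port i "") _ q
      ((PySem.Set.mem_ofList _ _).mp hq)]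

-- ===== VERDICT (by name: the statement is the Claim_ definition above) =====
theorem ClassifyByPort_spec : Claim_equal_ClassifyByPort := by
  intro Owner Goods Amount Port StdPort _ _
  exact pv_AB Owner Goods Amount Port StdPort
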